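-- pv_equiv track=rewrite | github.com/heanhsok/learn-dsa | others/balance_list.py | balance_list
-- ===== SOURCE A (Python) =====
-- from typing import List, Dict
-- from collections import Counter
--
-- def balance_list(arr: List[int]) -> Dict[int, int]:
--     """
--     Runtime:
--     - O(n) for Counter() function which counts the freq of each item
--     - O(klogk) for .most_common() function which sorts the the counts
--     - O(n) iterate through the sorted counts
--     """
--
--     counters = Counter(arr).most_common()
--     balancer = {}
--     for i, (ele, count) in enumerate(counters):
--         if i == 0:
--             max_count = count
--         else:
--             balancer[ele] = max_count - count
--     return balancer
-- ===== SOURCE B (Python) =====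
-- from typing import List, Dict
-- from collections import Counter
--
-- def balance_list(arr: List[int]) -> Dict[int, int]:
--     # Counting-sort by frequency instead of most_common()'s comparison sort.
--     counts = Counter(arr)
--     if not counts:
--         return {}
--     max_count = max(counts.values())
--     buckets = [[] for _ in range(max_count + 1)]
--     for e, c in counts.items():
--         buckets[c].append(e)
--     order = [e for c in range(max_count, 0, -1) for e in buckets[c]]
--     return {e: max_count - counts[e] for e in order[1:]}
-- ===== Notes on version B (the rewrite author's own statement) =====
-- stated objective: alternative
-- what changed: Replaces Counter.most_common()'s comparison sort and the enumerate/skip-index-0 loop by a counting sort: elements are bucketed by frequency, the descending frequency order is walked directly, and the dict is built from that order minus its first element.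
import Mathlib
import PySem

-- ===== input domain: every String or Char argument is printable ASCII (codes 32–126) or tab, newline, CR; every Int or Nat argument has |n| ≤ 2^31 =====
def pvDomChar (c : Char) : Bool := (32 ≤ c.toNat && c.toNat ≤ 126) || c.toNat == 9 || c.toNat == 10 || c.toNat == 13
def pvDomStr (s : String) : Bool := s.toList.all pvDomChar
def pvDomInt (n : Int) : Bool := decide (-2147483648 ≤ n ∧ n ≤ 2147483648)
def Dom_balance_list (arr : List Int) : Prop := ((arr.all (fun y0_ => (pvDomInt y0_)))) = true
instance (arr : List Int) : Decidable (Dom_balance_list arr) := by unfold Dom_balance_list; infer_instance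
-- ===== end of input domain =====

-- B replaces most_common()'s comparison sort by a counting sort over frequency buckets (same return value).

-- ===== PORT A =====
def balance_list (arr : List Int) : List (Int × Int) :=
  let counters := PySem.List.sorted (PySem.Dict.counter arr).items (fun p => p.2) true
  let st := (PySem.List.enumerate counters).foldl
      (fun (st : Int × PySem.Dict Int Int) ic =>
        if ic.1 == 0 then (ic.2.2, st.2)
        else (st.1, st.2.insert ic.2.1 (st.1 - ic.2.2)))
      (0, PySem.Dict.empty)
  st.2.items

-- ===== PORT B =====
-- buckets[c].append(e); exact here: B only calls it with 1 ≤ c ≤ max_count, an in-range index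
def pvBucketPut (bs : List (List Int)) (c : Int) (e : Int) : List (List Int) :=
  match PySem.List.pyIdx? bs.length c with
  | some i => bs.set i ((bs.getD i []) ++ [e])
  | none => bs

-- buckets[c] in the comprehension; exact here: 1 ≤ c ≤ max_count is in range
def pvBucketGet (bs : List (List Int)) (c : Int) : List Int :=
  (PySem.List.pyGet? bs c).getD []

def balance_list_alt (arr : List Int) : List (Int × Int) :=
  let counts := PySem.Dict.counter arr
  if counts.items.isEmpty then []
  else
    let maxCount := (PySem.List.max? counts.values (fun v => v)).getD 0
    let buckets := counts.items.foldl (fun bs p => pvBucketPut bs p.2 p.1)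
        (List.replicate (maxCount + 1).toNat [])
    let order := (PySem.List.pyRange maxCount 0 (-1)).flatMap (fun c => pvBucketGet buckets c)
    ((PySem.List.slice order (some 1) none).foldl
        (fun d e => d.insert e (maxCount - counts.getD e 0)) PySem.Dict.empty).items

-- ===== PRECONDITION & SPEC =====
def Spec_balance_list (arr : List Int) (out : List (Int × Int)) : Prop := out = balance_list_alt arr
instance (arr : List Int) (out : List (Int × Int)) : Decidable (Spec_balance_list arr out) := by unfold Spec_balance_list; infer_instance

-- ===== CLAIM (what is proved, stated in full; the proofs are below) =====
def Claim_equal_balance_list : Prop := ∀ (arr : List Int), Dom_balance_list arr → Spec_balance_list arr (balance_list arr)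

-- ===== LEMMAS AND PROOFS =====

lemma pv_pyRange_down (M : Int) :
    PySem.List.pyRange M 0 (-1) = (List.range M.toNat).map (fun k : Nat => M - (k : Int)) := by
  by_cases h : 0 < M
  · simp [PySem.List.pyRange, h]
    intro a _
    omega
  · have h0 : M.toNat = 0 := by omega
    simp [PySem.List.pyRange, h, h0]

lemma pv_mem_pyRange_down (M c : Int) :
    c ∈ PySem.List.pyRange M 0 (-1) ↔ 1 ≤ c ∧ c ≤ M := by
  rw [pv_pyRange_down]
  constructor
  · intro hm
    obtain ⟨k, hk, rfl⟩ := List.mem_map.1 hm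
    rw [List.mem_range] at hk
    omega
  · intro ⟨h1, h2⟩
    exact List.mem_map.2 ⟨(M - c).toNat, List.mem_range.2 (by omega), by omega⟩

lemma pv_pyRange_down_pairwise (M : Int) :
    (PySem.List.pyRange M 0 (-1)).Pairwise (fun a b => b < a) := by
  rw [pv_pyRange_down]
  refine List.pairwise_map.2 ?_
  refine List.Pairwise.imp ?_ List.pairwise_lt_range
  intro a b h
  omega

lemma pv_insertBy_skip {α : Type} (bef : α → α → Bool) (x : α) :
    ∀ (l t : List α), (∀ y ∈ l, bef x y = false) →
      PySem.List.insertBy bef x (l ++ t) = l ++ PySem.List.insertBy bef x t := by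
  intro l
  induction l with
  | nil => intro t _; simp
  | cons y ys ih =>
      intro t h
      have hy : bef x y = false := h y (by simp)
      simp [PySem.List.insertBy, hy, ih t (fun z hz => h z (by simp [hz]))]

lemma pv_insertBy_front {α : Type} (bef : α → α → Bool) (x : α) :
    ∀ (l : List α), (∀ y ∈ l, bef x y = true) →
      PySem.List.insertBy bef x l = x :: l := by
  intro l h
  cases l with
  | nil => simp [PySem.List.insertBy]
  | cons y ys => simp [PySem.List.insertBy, h y (by simp)]

lemma pv_insert_blocks (x : Int × Int) (g : Int → List (Int × Int))
    (hg : ∀ c, ∀ p ∈ g c, p.2 = c) :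
    ∀ ks : List Int, ks.Pairwise (fun a b => b < a) → x.2 ∈ ks →
      PySem.List.insertBy (fun a b => decide (b.2 < a.2)) x (ks.flatMap g)
        = ks.flatMap (fun c => g c ++ if x.2 == c then [x] else []) := by
  intro ks
  induction ks with
  | nil => intro _ hx; simp at hx
  | cons k ks' ih =>
      intro hpw hx
      have hpw' := (List.pairwise_cons.1 hpw).2
      have hklt := (List.pairwise_cons.1 hpw).1
      rw [List.flatMap_cons, List.flatMap_cons]
      by_cases hk : x.2 = k
      · -- skip the k-block, then insert in front of the rest
        rw [pv_insertBy_skip _ _ (g k) _ (by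
          intro y hy
          have := hg k y hy
          simp [this, hk])]
        rw [pv_insertBy_front _ _ _ (by
          intro y hy
          obtain ⟨c, hc, hyc⟩ := List.mem_flatMap.1 hy
          have := hg c y hyc
          have hck : c < k := hklt c hc
          simp [this]; omega)]
        have hrest : ks'.flatMap (fun c => g c ++ if x.2 == c then [x] else []) = ks'.flatMap g := by
          apply List.flatMap_congr
          intro c hc
          have : x.2 ≠ c := by have := hklt c hc; omega
          simp [this]
        rw [hrest]
        simp [hk]
      · have hx' : x.2 ∈ ks' := by
          rcases List.mem_cons.1 hx with h | h
          · exact absurd h hk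
          · exact h
        rw [pv_insertBy_skip _ _ (g k) _ (by
          intro y hy
          have hy2 := hg k y hy
          have : k > x.2 := by have := hklt x.2 hx'; omega
          simp [hy2]; omega)]
        rw [ih hpw' hx']
        have : (x.2 == k) = false := by simp [hk]
        simp [this]

lemma pv_sorted_rev_eq_flatMap (M : Int) (xs : List (Int × Int))
    (h : ∀ p ∈ xs, 1 ≤ p.2 ∧ p.2 ≤ M) :
    PySem.List.sorted xs (fun p => p.2) true
      = (PySem.List.pyRange M 0 (-1)).flatMap (fun c => xs.filter (fun p => p.2 == c)) := by
  induction xs using List.reverseRecOn with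
  | nil => simp [PySem.List.sorted]
  | append_singleton xs x ih =>
      have hx := h x (by simp)
      have hxs : ∀ p ∈ xs, 1 ≤ p.2 ∧ p.2 ≤ M := fun p hp => h p (by simp [hp])
      rw [PySem.List.sorted_rev_eq_foldl_insertBy, List.foldl_append, List.foldl_cons, List.foldl_nil,
        ← PySem.List.sorted_rev_eq_foldl_insertBy, ih hxs]
      rw [pv_insert_blocks x (fun c => xs.filter (fun p => p.2 == c))
        (by intro c p hp; simpa using (List.mem_filter.1 hp).2)
        _ (pv_pyRange_down_pairwise M) ((pv_mem_pyRange_down M x.2).2 hx)]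
      apply List.flatMap_congr
      intro c _
      rw [List.filter_append]
      by_cases hxc : x.2 = c
      · simp [List.filter, hxc]
      · have hb : (x.2 == c) = false := by simp [hxc]
        simp [List.filter, hb]

lemma pv_max?_cons : ∀ (t : List Int) (a : Int),
    ∃ m, PySem.List.max? (a :: t) (fun v => v) = some m ∧ m ∈ a :: t := by
  intro t
  induction t with
  | nil => intro a; exact ⟨a, by simp [PySem.List.max?], by simp⟩
  | cons x t' ih =>
      intro a
      by_cases h : a < x
      · obtain ⟨m, hm, hmem⟩ := ih x
        refine ⟨m, ?_, ?_⟩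
        · rw [← hm]; simp [PySem.List.max?, h]
        · rcases List.mem_cons.1 hmem with rfl | hmem <;> simp [hmem]
      · obtain ⟨m, hm, hmem⟩ := ih a
        refine ⟨m, ?_, ?_⟩
        · rw [← hm]; simp [PySem.List.max?, h]
        · rcases List.mem_cons.1 hmem with rfl | hmem <;> simp [hmem]

lemma pv_max?_mem (xs : List Int) (h : xs ≠ []) :
    ∃ m, PySem.List.max? xs (fun v => v) = some m ∧ m ∈ xs := by
  cases xs with
  | nil => exact absurd rfl h
  | cons x t => exact pv_max?_cons t x

lemma pv_buckets_spec :
    ∀ (l : List (Int × Int)) (bs : List (List Int)),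
      (∀ p ∈ l, 0 ≤ p.2 ∧ p.2 < (bs.length : Int)) →
      (l.foldl (fun bs p => pvBucketPut bs p.2 p.1) bs).length = bs.length ∧
      ∀ i : Nat, i < bs.length →
        (l.foldl (fun bs p => pvBucketPut bs p.2 p.1) bs).getD i []
          = bs.getD i [] ++ (l.filter (fun p => p.2 == (i : Int))).map (·.1) := by
  intro l
  induction l with
  | nil => intro bs _; simp
  | cons p l' ih =>
      intro bs hb
      have hp := hb p (by simp)
      have hput : pvBucketPut bs p.2 p.1 = bs.set p.2.toNat ((bs.getD p.2.toNat []) ++ [p.1]) := by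
        unfold pvBucketPut PySem.List.pyIdx?
        have h1 : (0:Int) ≤ p.2 := hp.1
        have h2 : p.2 < (bs.length : Int) := hp.2
        simp [h1, h2]
      have hlen : (pvBucketPut bs p.2 p.1).length = bs.length := by
        rw [hput]; simp
      have hb' : ∀ q ∈ l', 0 ≤ q.2 ∧ q.2 < ((pvBucketPut bs p.2 p.1).length : Int) := by
        intro q hq; rw [hlen]; exact hb q (by simp [hq])
      obtain ⟨ihlen, ihget⟩ := ih (pvBucketPut bs p.2 p.1) hb'
      constructor
      · simp only [List.foldl_cons]; rw [ihlen, hlen]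
      · intro i hi
        simp only [List.foldl_cons]
        rw [ihget i (by rw [hlen]; exact hi)]
        rw [hput]
        by_cases hc : p.2 = (i : Int)
        · have hti : p.2.toNat = i := by omega
          rw [List.getD_eq_getElem?_getD, hti, List.getElem?_set_self]
          simp only [List.filter_cons]
          have : (p.2 == (i : Int)) = true := by simp [hc]
          rw [this]
          simp [List.getD_eq_getElem?_getD]
          exact hi
        · have hne : p.2.toNat ≠ i := by omega
          rw [List.getD_eq_getElem?_getD, List.getElem?_set_ne hne]
          simp only [List.filter_cons]
          have : (p.2 == (i : Int)) = false := by simp [hc]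
          rw [this]
          simp [List.getD_eq_getElem?_getD]

lemma pv_dict_fold_items (v : Int → Int) :
    ∀ (es : List Int) (d : PySem.Dict Int Int),
      es.Nodup → (∀ e ∈ es, d.contains e = false) →
      (es.foldl (fun d e => d.insert e (v e)) d).items = d.items ++ es.map (fun e => (e, v e)) := by
  intro es
  induction es with
  | nil => intro d _ _; simp
  | cons e es' ih =>
      intro d hnd hfresh
      have hfe : d.contains e = false := hfresh e (by simp)
      have hins : (d.insert e (v e)).items = d.items ++ [(e, v e)] := by
        rw [PySem.Dict.items_insert, hfe]; simp
      have hfresh' : ∀ e' ∈ es', (d.insert e (v e)).contains e' = false := by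
        intro e' he'
        rw [PySem.Dict.contains_insert]
        have hne : e' ≠ e := by
          intro h; exact (List.nodup_cons.1 hnd).1 (h ▸ he')
        simp [hne, hfresh e' (by simp [he'])]
      simp only [List.foldl_cons]
      rw [ih (d.insert e (v e)) (List.nodup_cons.1 hnd).2 hfresh', hins]
      simp

lemma pv_foldA (M : Int) :
    ∀ (l : List (Int × Int)) (n : Int) (d : PySem.Dict Int Int),
      1 ≤ n → (l.map (·.1)).Nodup → (∀ p ∈ l, d.contains p.1 = false) →
      (PySem.List.enumerate l n).foldl
          (fun (st : Int × PySem.Dict Int Int) ic =>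
            if ic.1 == 0 then (ic.2.2, st.2)
            else (st.1, st.2.insert ic.2.1 (st.1 - ic.2.2)))
          (M, d)
        = (M, PySem.Dict.mk (d.items ++ l.map (fun p => (p.1, M - p.2)))) := by
  intro l
  induction l with
  | nil =>
      intro n d _ _ _
      simp [PySem.List.enumerate]
  | cons p l' ih =>
      intro n d hn hnd hfresh
      have hn0 : (n == 0) = false := by simp; omega
      have hins : (d.insert p.1 (M - p.2)).items = d.items ++ [(p.1, M - p.2)] := by
        rw [PySem.Dict.items_insert, hfresh p (by simp)]; simp
      have hfresh' : ∀ q ∈ l', (d.insert p.1 (M - p.2)).contains q.1 = false := by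
        intro q hq
        rw [PySem.Dict.contains_insert]
        have hne : q.1 ≠ p.1 := by
          rw [List.map_cons, List.nodup_cons] at hnd
          intro h
          exact hnd.1 (h ▸ (List.mem_map.2 ⟨q, hq, rfl⟩))
        simp [hne, hfresh q (by simp [hq])]
      have hnd' : (l'.map (·.1)).Nodup := by
        rw [List.map_cons, List.nodup_cons] at hnd
        exact hnd.2
      rw [show PySem.List.enumerate (p :: l') n = (n, p) :: PySem.List.enumerate l' (n + 1) from rfl]
      simp only [List.foldl_cons, hn0, Bool.false_eq_true, if_false]
      rw [ih (n + 1) (d.insert p.1 (M - p.2)) (by omega) hnd' hfresh', hins]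
      simp

-- ===== VERDICT (by name: the statement is the Claim_ definition above) =====
theorem balance_list_spec : Claim_equal_balance_list := by
  intro arr _
  unfold Spec_balance_list
  by_cases harr : arr = []
  · subst harr; decide
  · -- notation
    obtain ⟨a0, ha0⟩ := List.exists_mem_of_ne_nil arr harr
    have ha0' : a0 ∈ PySem.Set.ofList arr := (PySem.Set.mem_ofList arr a0).2 ha0
    have hitems_eq : (PySem.Dict.counter arr).items
        = List.map (fun k => (k, (List.count k arr : Int))) (PySem.Set.ofList arr) :=
      PySem.Dict.items_counter arr
    set items := (PySem.Dict.counter arr).items with hidef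
    have hne : items ≠ [] := by
      rw [hitems_eq]
      intro h
      rw [List.map_eq_nil_iff] at h
      rw [h] at ha0'
      simp at ha0'
    have hvals : (PySem.Dict.counter arr).values = items.map (·.2) := rfl
    obtain ⟨m, hmax, hmmem⟩ := pv_max?_mem (items.map (·.2)) (by
      intro h; exact hne (List.map_eq_nil_iff.1 h))
    set M := (PySem.List.max? ((PySem.Dict.counter arr).values) (fun v => v)).getD 0 with hMdef
    have hM : M = m := by rw [hMdef, hvals, hmax]; rfl
    -- bounds
    have hmem_items : ∀ p ∈ items, p = (p.1, (List.count p.1 arr : Int)) ∧ p.1 ∈ arr := by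
      intro p hp
      rw [hitems_eq] at hp
      obtain ⟨k, hk, rfl⟩ := List.mem_map.1 hp
      exact ⟨rfl, (PySem.Set.mem_ofList arr k).1 hk⟩
    have hbnd : ∀ p ∈ items, 1 ≤ p.2 ∧ p.2 ≤ M := by
      intro p hp
      obtain ⟨hpe, hparr⟩ := hmem_items p hp
      constructor
      · have : 0 < List.count p.1 arr := List.count_pos_iff.2 hparr
        rw [show p.2 = ((List.count p.1 arr : Int)) from congrArg Prod.snd hpe]
        omega
      · rw [hM]
        exact PySem.List.max?_isMax hmax p.2 (List.mem_map.2 ⟨p, hp, rfl⟩)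
    have hM1 : 1 ≤ M := by
      obtain ⟨q, hq, hqm⟩ := List.mem_map.1 hmmem
      have := (hbnd q hq).1
      rw [hM, ← hqm]; exact this
    -- the sorted list
    have hsrt := pv_sorted_rev_eq_flatMap M items hbnd
    have hsrt_ne : PySem.List.sorted items (fun p => p.2) true ≠ [] := by
      rw [Ne, PySem.List.sorted_eq_nil_iff]; exact hne
    obtain ⟨p0, rest, hcons⟩ : ∃ p0 rest, PySem.List.sorted items (fun p => p.2) true = p0 :: rest := by
      cases h : PySem.List.sorted items (fun p => p.2) true with
      | nil => exact absurd h hsrt_ne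
      | cons x t => exact ⟨x, t, rfl⟩
    have hmem_srt : ∀ p ∈ p0 :: rest, p ∈ items := by
      intro p hp
      rw [← hcons] at hp
      exact (PySem.List.mem_sorted items (fun p => p.2) true p).1 hp
    have hp0 : p0.2 = M := by
      have h1 : p0.2 ≤ M := (hbnd p0 (hmem_srt p0 (by simp))).2
      obtain ⟨q, hq, hqm⟩ := List.mem_map.1 hmmem
      have h2 : q.2 ≤ p0.2 := PySem.List.key_head_sorted_rev_ge items (fun p => p.2) hcons q hq
      rw [hM]; rw [hM, ← hqm] at h1; omega
      -- q.2 = m = M ≤ p0.2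
    -- nodup keys
    have hkeys : (items.map (·.1)).Nodup := by
      rw [hitems_eq, List.map_map]
      have : ((fun p : Int × Int => p.1) ∘ (fun k => (k, (List.count k arr : Int)))) = id := rfl
      rw [this, List.map_id]
      exact PySem.Set.nodup_ofList arr
    have hsrt_keys : ((p0 :: rest).map (·.1)).Nodup := by
      have hperm : (PySem.List.sorted items (fun p => p.2) true).Perm items :=
        PySem.List.sorted_perm items (fun p => p.2) true
      rw [hcons] at hperm
      exact ((hperm.map (·.1)).nodup_iff).2 hkeys
    have hrest_keys : (rest.map (·.1)).Nodup := by
      rw [List.map_cons, List.nodup_cons] at hsrt_keys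
      exact hsrt_keys.2
    -- A's value
    have hempty_contains : ∀ e : Int, (PySem.Dict.empty : PySem.Dict Int Int).contains e = false := by
      intro e; rfl
    have hA : balance_list arr = rest.map (fun p => (p.1, M - p.2)) := by
      simp only [balance_list]
      rw [← hidef, hcons]
      rw [show PySem.List.enumerate (p0 :: rest) 0 = (0, p0) :: PySem.List.enumerate rest 1 from rfl]
      rw [List.foldl_cons]
      have hstep : (if ((0:Int) == 0) = true then (p0.2, (PySem.Dict.empty : PySem.Dict Int Int))
            else ((0:Int), PySem.Dict.empty.insert p0.1 ((0:Int) - p0.2))) = (p0.2, PySem.Dict.empty) := rfl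
      rw [hstep]
      rw [pv_foldA p0.2 rest 1 PySem.Dict.empty (by omega) hrest_keys
        (fun p _ => hempty_contains p.1)]
      rw [hp0]
      rfl
    -- B's value
    have hrepl_len : ((List.replicate (M+1).toNat ([]:List Int)).length : Int) = M + 1 := by
      simp; omega
    obtain ⟨hblen, hbget⟩ := pv_buckets_spec items (List.replicate (M+1).toNat []) (by
      intro p hp
      have := hbnd p hp
      rw [hrepl_len]
      omega)
    have hB : balance_list_alt arr
        = (rest.map (·.1)).map (fun e => (e, M - (PySem.Dict.counter arr).getD e 0)) := by
      simp only [balance_list_alt]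
      rw [← hidef, ← hMdef]
      rw [if_neg (by simp [List.isEmpty_iff, hne])]
      have horder : (PySem.List.pyRange M 0 (-1)).flatMap
            (fun c => pvBucketGet (items.foldl (fun bs p => pvBucketPut bs p.2 p.1)
              (List.replicate (M+1).toNat [])) c)
          = ((p0 :: rest).map (·.1)) := by
        have h1 : ∀ c ∈ PySem.List.pyRange M 0 (-1),
            pvBucketGet (items.foldl (fun bs p => pvBucketPut bs p.2 p.1)
                (List.replicate (M+1).toNat [])) c
              = (items.filter (fun p => p.2 == c)).map (·.1) := by
          intro c hc
          obtain ⟨hc1, hc2⟩ := (pv_mem_pyRange_down M c).1 hc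
          have hlen2 : (items.foldl (fun bs p => pvBucketPut bs p.2 p.1)
              (List.replicate (M+1).toNat [])).length = (M+1).toNat := by
            rw [hblen]; simp
          have hcnat : ((c.toNat : Int)) = c := by omega
          have hclt : c.toNat < (M+1).toNat := by omega
          unfold pvBucketGet
          rw [show PySem.List.pyGet? (items.foldl (fun bs p => pvBucketPut bs p.2 p.1)
                (List.replicate (M+1).toNat [])) c
              = (items.foldl (fun bs p => pvBucketPut bs p.2 p.1)
                (List.replicate (M+1).toNat []))[c.toNat]? from by
            simp [PySem.List.pyGet?, PySem.List.pyIdx?, hlen2,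
              show (0:Int) ≤ c by omega, hc2]]
          rw [← List.getD_eq_getElem?_getD]
          rw [hbget c.toNat (by simpa using hclt)]
          rw [hcnat]
          simp
        rw [List.flatMap_congr h1]
        have h2 : (PySem.List.pyRange M 0 (-1)).flatMap
              (fun c => (items.filter (fun p => p.2 == c)).map (·.1))
            = ((PySem.List.pyRange M 0 (-1)).flatMap
              (fun c => items.filter (fun p => p.2 == c))).map (·.1) := by
          rw [List.map_flatMap]
        rw [h2, ← hsrt, hcons]
      rw [horder]
      rw [PySem.List.slice_from _ (by norm_num : (0:Int) ≤ 1)]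
      rw [show ((1:Int).toNat) = 1 from rfl]
      rw [List.map_cons, List.drop_one, List.tail_cons]
      rw [pv_dict_fold_items (fun e => M - (PySem.Dict.counter arr).getD e 0) (rest.map (·.1))
        PySem.Dict.empty hrest_keys (fun e _ => hempty_contains e)]
      rfl
    rw [hA, hB, List.map_map]
    apply List.map_congr_left
    intro p hp
    have hpi : p ∈ items := hmem_srt p (by simp [hp])
    have hpe := (hmem_items p hpi).1
    have hgd : (PySem.Dict.counter arr).getD p.1 0 = (List.count p.1 arr : Int) :=
      PySem.Dict.getD_counter arr p.1
    have hp2 : p.2 = (List.count p.1 arr : Int) := congrArg Prod.snd hpe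
    simp [Function.comp, hgd, ← hp2]
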